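-- pv_equiv track=rewrite | github.com/ahmedloona/alpha | appacademy-online-enumerable-exercises-c9c21b3ea398/lib/enumerables2.py | non_unique_letters
-- ===== SOURCE A (Python) =====
-- def non_unique_letters(string):
--     array = list(string)
--     unique_characters = list(set(array))
--     if " " in unique_characters:
--         unique_characters.remove(" ")
--     result = [char for char in unique_characters if array.count(char) > 1]
--     result.sort()
--     return result
-- ===== SOURCE B (Python) =====
-- def non_unique_letters(string):
--     s = sorted(string)
--     result = []
--     i = 0
--     n = len(s)
--     while i < n:
--         j = i + 1
--         while j < n and s[j] == s[i]:
--             j += 1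
--         if s[i] != " " and j - i >= 2:
--             result.append(s[i])
--         i = j
--     return result
-- ===== Notes on version B (the rewrite author's own statement) =====
-- stated objective: alternative
-- what changed: Replaces the set + repeated list.count passes + final sort with a single run-length scan over the sorted characters, appending each non-space character whose run has length at least 2 (sorting makes the result ordered and distinct by construction).
import Mathlib
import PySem

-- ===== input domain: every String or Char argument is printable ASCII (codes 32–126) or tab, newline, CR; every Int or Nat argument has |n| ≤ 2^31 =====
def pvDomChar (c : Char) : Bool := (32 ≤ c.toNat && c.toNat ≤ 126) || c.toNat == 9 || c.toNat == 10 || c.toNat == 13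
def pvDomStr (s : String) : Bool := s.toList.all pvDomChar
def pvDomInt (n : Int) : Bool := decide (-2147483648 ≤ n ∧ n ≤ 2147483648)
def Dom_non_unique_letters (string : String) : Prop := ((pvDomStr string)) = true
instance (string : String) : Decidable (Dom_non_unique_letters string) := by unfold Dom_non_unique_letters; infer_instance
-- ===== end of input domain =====

-- B replaces set + repeated list.count passes + final sort by one run-length scan over the
-- sorted characters (objective: alternative; same results, different shape).

-- ===== PORT A =====
-- Python's one-character strings are modelled as Char while collected/counted and turned
-- into String (exactly as Python holds them) in the comprehension step.
def non_unique_letters (string : String) : List String :=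
  let array : List Char := string.toList
  let uc0 : List Char := PySem.Set.ofList array
  let unique_characters : List Char :=
    if ' ' ∈ uc0 then (PySem.List.remove? uc0 ' ').getD uc0 else uc0
  let result : List String :=
    (unique_characters.filter (fun c => decide (PySem.List.count array c > 1))).map
      (fun c => String.ofList [c])
  PySem.List.sorted result (fun s => s) false

-- ===== PORT B =====
-- the outer while loop of Source B: each step consumes one run of equal characters
-- (the inner while j advances over the run; takeWhile/dropWhile are that inner loop)
def runScanB : List Char → List String
  | [] => []
  | c :: rest =>
    (if c ≠ ' ' ∧ (rest.takeWhile (fun x => x == c)).length + 1 ≥ 2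
     then [String.ofList [c]] else [])
      ++ runScanB (rest.dropWhile (fun x => x == c))
termination_by M => M.length
decreasing_by
  simp only [List.length_cons]
  exact Nat.lt_succ_of_le (List.length_dropWhile_le _ _)

def non_unique_letters_alt (string : String) : List String :=
  runScanB (PySem.List.sorted string.toList (fun c => c) false)

-- ===== PRECONDITION & SPEC =====
def Spec_non_unique_letters (string : String) (out : List String) : Prop := out = non_unique_letters_alt string
instance (string : String) (out : List String) : Decidable (Spec_non_unique_letters string out) := by unfold Spec_non_unique_letters; infer_instance

-- ===== CLAIM (what is proved, stated in full; the proofs are below) =====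
def Claim_equal_non_unique_letters : Prop := ∀ (string : String), Dom_non_unique_letters string → Spec_non_unique_letters string (non_unique_letters string)

-- ===== LEMMAS AND PROOFS =====

-- folding Set.add over elements already in the accumulator changes nothing
theorem pv_foldl_add_mem (t : List Char) : ∀ s : List Char, (∀ x ∈ t, x ∈ s) →
    List.foldl PySem.Set.add s t = s := by
  induction t with
  | nil => intro s _; rfl
  | cons y t ih =>
    intro s hs
    have hy : y ∈ s := hs y (by simp)
    have hstep : PySem.Set.add s y = s := by
      simp [PySem.Set.add, PySem.Set.contains, hy]
    rw [List.foldl_cons, hstep]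
    exact ih s (fun x hx => hs x (by simp [hx]))

-- folding Set.add keeps a head the tail never mentions
theorem pv_foldl_add_cons (t : List Char) (c : Char) (hc : c ∉ t) :
    ∀ s : List Char, List.foldl PySem.Set.add (c :: s) t = c :: List.foldl PySem.Set.add s t := by
  induction t with
  | nil => intro s; rfl
  | cons y t ih =>
    intro s
    have hyc : y ≠ c := fun h => hc (by simp [h])
    have hstep : PySem.Set.add (c :: s) y = c :: PySem.Set.add s y := by
      simp [PySem.Set.add, PySem.Set.contains, hyc]
      by_cases hy : y ∈ s <;> simp [hy]
    rw [List.foldl_cons, hstep, List.foldl_cons]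
    exact ih (fun h => hc (by simp [h])) _

-- the first element surviving dropWhile fails the test
theorem pv_dropWhile_head_false {p : Char → Bool} {e : Char} {t : List Char} :
    ∀ l : List Char, l.dropWhile p = e :: t → p e = false := by
  intro l
  induction l with
  | nil => intro h; simp at h
  | cons x xs ih =>
    intro h
    rw [List.dropWhile_cons] at h
    by_cases hx : p x = true
    · exact ih (by simpa [hx] using h)
    · obtain ⟨rfl, -⟩ := List.cons.inj (by simpa [hx] using h)
      simpa using hx

-- the facts one run-step of Source B needs, for a sorted list c :: rest
theorem pv_run_facts (c : Char) (rest : List Char) (h : (c :: rest).Pairwise (· ≤ ·)) :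
    (∀ d ∈ rest.dropWhile (fun x => x == c), c < d)
    ∧ PySem.List.dedup (c :: rest) = c :: PySem.List.dedup (rest.dropWhile (fun x => x == c))
    ∧ List.count c (c :: rest) = (rest.takeWhile (fun x => x == c)).length + 1
    ∧ (rest.dropWhile (fun x => x == c)).Pairwise (· ≤ ·)
    ∧ (∀ d, d ≠ c → List.count d (c :: rest) = List.count d (rest.dropWhile (fun x => x == c))) := by
  rw [List.pairwise_cons] at h
  obtain ⟨hcr, hrest⟩ := h
  set run := rest.takeWhile (fun x => x == c) with hrun
  set rest' := rest.dropWhile (fun x => x == c) with hrest'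
  have hsplit : run ++ rest' = rest := List.takeWhile_append_dropWhile
  have hrunc : ∀ x ∈ run, x = c := fun x hx => by
    have := List.mem_takeWhile_imp hx; simpa using this
  have hpw' : rest'.Pairwise (· ≤ ·) := List.Pairwise.sublist (List.dropWhile_sublist _) hrest
  have hlt : ∀ d ∈ rest', c < d := by
    cases hE : rest' with
    | nil => simp
    | cons e t =>
      have hec : (e == c) = false := pv_dropWhile_head_false (p := fun x => x == c) rest (by rw [← hrest']; exact hE)
      have hec' : e ≠ c := by simpa using hec
      have hce : c < e := by
        have he : e ∈ rest := by
          rw [← hsplit, hE]; simp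
        exact lt_of_le_of_ne (hcr e he) (Ne.symm hec')
      intro d hd
      rcases List.mem_cons.mp hd with rfl | hd2
      · exact hce
      · have het : e ≤ d := by
          rw [hE] at hpw'
          exact (List.pairwise_cons.mp hpw').1 d hd2
        exact lt_of_lt_of_le hce het
  have hnm : c ∉ rest' := fun hmem => lt_irrefl c (hlt c hmem)
  refine ⟨hlt, ?_, ?_, hpw', ?_⟩
  · rw [PySem.List.dedup_eq_ofList, PySem.List.dedup_eq_ofList,
        PySem.Set.ofList_eq_foldl, PySem.Set.ofList_eq_foldl]
    rw [List.foldl_cons]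
    have h0 : PySem.Set.add ([] : List Char) c = [c] := by
      simp [PySem.Set.add, PySem.Set.contains]
    rw [h0, ← hsplit, List.foldl_append]
    rw [pv_foldl_add_mem run [c] (fun x hx => by simp [hrunc x hx])]
    exact pv_foldl_add_cons rest' c hnm []
  · rw [List.count_cons_self, ← hsplit, List.count_append]
    rw [List.count_eq_length.mpr (fun b hb => (hrunc b hb).symm),
        List.count_eq_zero.mpr hnm]
  · intro d hd
    rw [List.count_cons_of_ne hd.symm, ← hsplit, List.count_append]
    have hdr : d ∉ run := fun hm => hd (hrunc d hm)
    rw [List.count_eq_zero.mpr hdr, Nat.zero_add]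

-- run scan over a sorted list = deduplicate, keep non-space chars of count ≥ 2
theorem pv_dedup_pairwise_lt_fuel (n : Nat) : ∀ M : List Char, M.length ≤ n → M.Pairwise (· ≤ ·) →
    (PySem.List.dedup M).Pairwise (· < ·) := by
  induction n with
  | zero =>
    intro M hlen _
    have : M = [] := List.eq_nil_of_length_eq_zero (Nat.le_zero.mp hlen)
    subst this
    simp [PySem.List.dedup_eq_ofList, PySem.Set.ofList]
  | succ n ih =>
    intro M hlen h
    cases M with
    | nil => simp [PySem.List.dedup_eq_ofList, PySem.Set.ofList]
    | cons c rest =>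
      obtain ⟨hlt, hded, -, hpw', -⟩ := pv_run_facts c rest h
      rw [hded, List.pairwise_cons]
      constructor
      · intro d hd
        exact hlt d ((PySem.List.mem_dedup _ _).mp hd)
      · exact ih _ (by
          have h1 := List.length_dropWhile_le (fun x => x == c) rest
          simp only [List.length_cons] at hlen
          omega) hpw'

theorem pv_dedup_pairwise_lt (M : List Char) (h : M.Pairwise (· ≤ ·)) :
    (PySem.List.dedup M).Pairwise (· < ·) :=
  pv_dedup_pairwise_lt_fuel M.length M le_rfl h

theorem pv_runScanB_eq_fuel (n : Nat) : ∀ M : List Char, M.length ≤ n → M.Pairwise (· ≤ ·) →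
    runScanB M = ((PySem.List.dedup M).filter
        (fun d => decide (d ≠ ' ' ∧ 1 < List.count d M))).map (fun c => String.ofList [c]) := by
  induction n with
  | zero =>
    intro M hlen _
    have : M = [] := List.eq_nil_of_length_eq_zero (Nat.le_zero.mp hlen)
    subst this
    simp [runScanB, PySem.List.dedup_eq_ofList, PySem.Set.ofList]
  | succ n ih =>
    intro M hlen h
    cases M with
    | nil => simp [runScanB, PySem.List.dedup_eq_ofList, PySem.Set.ofList]
    | cons c rest =>
      obtain ⟨hlt, hded, hcnt, hpw', hcnt'⟩ := pv_run_facts c rest h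
      have hlen' : (rest.dropWhile (fun x => x == c)).length ≤ n := by
        have h1 := List.length_dropWhile_le (fun x => x == c) rest
        simp only [List.length_cons] at hlen
        omega
      rw [runScanB, hded, List.filter_cons]
      have hcond : (decide (c ≠ ' ' ∧ 1 < List.count c (c :: rest)) = true)
          ↔ (c ≠ ' ' ∧ (rest.takeWhile (fun x => x == c)).length + 1 ≥ 2) := by
        rw [hcnt]; simp; omega
      have htail : (PySem.List.dedup (rest.dropWhile (fun x => x == c))).filter
            (fun d => decide (d ≠ ' ' ∧ 1 < List.count d (c :: rest)))
          = (PySem.List.dedup (rest.dropWhile (fun x => x == c))).filter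
            (fun d => decide (d ≠ ' ' ∧ 1 < List.count d (rest.dropWhile (fun x => x == c)))) := by
        apply List.filter_congr
        intro d hd
        have hdm : d ∈ rest.dropWhile (fun x => x == c) := (PySem.List.mem_dedup _ _).mp hd
        have hdc : d ≠ c := fun hdc => lt_irrefl c (hdc ▸ hlt d hdm)
        rw [hcnt' d hdc]
      by_cases hc : c ≠ ' ' ∧ (rest.takeWhile (fun x => x == c)).length + 1 ≥ 2
      · rw [if_pos hc, if_pos (hcond.mpr hc)]
        rw [htail, List.map_cons, ih _ hlen' hpw']
        rfl
      · rw [if_neg hc, if_neg (fun hh => hc (hcond.mp hh))]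
        rw [htail, ih _ hlen' hpw']
        rfl

theorem pv_runScanB_eq (M : List Char) (h : M.Pairwise (· ≤ ·)) :
    runScanB M = ((PySem.List.dedup M).filter
        (fun d => decide (d ≠ ' ' ∧ 1 < List.count d M))).map (fun c => String.ofList [c]) :=
  pv_runScanB_eq_fuel M.length M le_rfl h

theorem pv_mk_lt (a b : Char) (h : a < b) : String.ofList [a] < String.ofList [b] := by
  rw [String.lt_iff_toList_lt]
  simp only [String.toList_ofList]
  exact List.Lex.rel h

-- ===== VERDICT (by name: the statement is the Claim_ definition above) =====
theorem non_unique_letters_spec : Claim_equal_non_unique_letters := by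
  intro s _
  unfold Spec_non_unique_letters non_unique_letters non_unique_letters_alt
  set L := s.toList with hL
  set M := PySem.List.sorted L (fun c => c) false with hM
  set U := PySem.Set.ofList L with hU
  have hpwM : M.Pairwise (· ≤ ·) := by
    simpa using PySem.List.sorted_pairwise L (fun c => c)
  rw [pv_runScanB_eq M hpwM]
  have hcc : ∀ d, List.count d M = List.count d L :=
    fun d => (PySem.List.sorted_perm L (fun c => c) false).count_eq d
  have hql : (PySem.List.dedup M).filter (fun d => decide (d ≠ ' ' ∧ 1 < List.count d M))
      = (PySem.List.dedup M).filter (fun d => decide (d ≠ ' ' ∧ 1 < List.count d L)) :=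
    List.filter_congr (fun d _ => by rw [hcc d])
  rw [hql]
  show PySem.List.sorted
      (((if ' ' ∈ U then (PySem.List.remove? U ' ').getD U else U).filter
          (fun c => decide (PySem.List.count L c > 1))).map (fun c => String.ofList [c]))
      (fun s => s) false
    = ((PySem.List.dedup M).filter
        (fun d => decide (d ≠ ' ' ∧ 1 < List.count d L))).map (fun c => String.ofList [c])
  have hU' : (if ' ' ∈ U then (PySem.List.remove? U ' ').getD U else U)
      = U.filter (fun c => c != ' ') := by
    by_cases hsp : ' ' ∈ U
    · rw [if_pos hsp, PySem.List.remove?_eq_some_erase U ' ' hsp, Option.getD_some]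
      exact (PySem.Set.nodup_ofList L).erase_eq_filter ' '
    · rw [if_neg hsp]
      symm
      apply List.filter_eq_self.mpr
      intro a ha
      simp only [bne_iff_ne, ne_eq]
      exact fun h => hsp (h ▸ ha)
  rw [hU']
  have hff : (U.filter (fun c => c != ' ')).filter (fun c => decide (PySem.List.count L c > 1))
      = U.filter (fun c => decide (c ≠ ' ' ∧ 1 < List.count c L)) := by
    rw [List.filter_filter]
    apply List.filter_congr
    intro c _
    rw [PySem.List.count_eq]
    by_cases h1 : c = ' ' <;> by_cases h2 : 1 < List.count c L <;> simp [h1, h2]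
  rw [hff]
  apply PySem.List.sorted_eq_of_perm_of_pairwise_lt _ _ (fun s => s)
  · -- permutation
    apply List.Perm.map
    apply List.Perm.filter
    have hnd : (PySem.List.dedup M).Nodup := by
      rw [PySem.List.dedup_eq_ofList]; exact PySem.Set.nodup_ofList M
    refine (List.perm_ext_iff_of_nodup hnd (PySem.Set.nodup_ofList L)).mpr ?_
    intro a
    rw [PySem.List.mem_dedup, PySem.Set.mem_ofList, hM, PySem.List.mem_sorted]
  · -- strictly increasing
    rw [List.pairwise_map]
    have h1 : ((PySem.List.dedup M).filter
        (fun d => decide (d ≠ ' ' ∧ 1 < List.count d L))).Pairwise (· < ·) :=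
      (pv_dedup_pairwise_lt M hpwM).filter _
    exact h1.imp (fun hab => pv_mk_lt _ _ hab)
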